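-- pv_equiv track=rewrite | github.com/airberlin1/adventofcode2024 | 05/printer.py | assemble_incorrect_updates
-- ===== SOURCE A (Python) =====
-- def assemble_incorrect_updates(updates,rules):
--     def get_inc_update(update_i):
--         for i, page in enumerate(update_i):
--             for rule in rules:
--             # Widerspruch finden?
--                 if page == rule[1]:
--                     if rule[0] in update_i[i:]:
--                         return update_i
--         return False
--
--     incorrectupdates = []
--     for update in updates:
--         if new_inc := get_inc_update(update):
--             incorrectupdates.append(new_inc)
--     return incorrectupdates
-- ===== SOURCE B (Python) =====
-- def assemble_incorrect_updates(updates, rules):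
--     pairs = [(r[0], r[1]) for r in rules]
--     out = []
--     for update in updates:
--         first = {}
--         last = {}
--         for i, p in enumerate(update):
--             if p not in first:
--                 first[p] = i
--             last[p] = i
--         if any(b in first and a in last and first[b] <= last[a] for a, b in pairs):
--             out.append(update)
--     return out
-- ===== Notes on version B (the rewrite author's own statement) =====
-- stated objective: alternative
-- what changed: A rescans the rule list for every page and scans the update's tail for every matching rule; B makes one pass per update building first/last-occurrence index dicts and then checks each rule once with O(1) lookups (update is wrong iff last[rule[0]] >= first[rule[1]]).
-- outside the precondition, e.g. on assemble_incorrect_updates([], [[1]]): A returns [], B raises IndexError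
import Mathlib
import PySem

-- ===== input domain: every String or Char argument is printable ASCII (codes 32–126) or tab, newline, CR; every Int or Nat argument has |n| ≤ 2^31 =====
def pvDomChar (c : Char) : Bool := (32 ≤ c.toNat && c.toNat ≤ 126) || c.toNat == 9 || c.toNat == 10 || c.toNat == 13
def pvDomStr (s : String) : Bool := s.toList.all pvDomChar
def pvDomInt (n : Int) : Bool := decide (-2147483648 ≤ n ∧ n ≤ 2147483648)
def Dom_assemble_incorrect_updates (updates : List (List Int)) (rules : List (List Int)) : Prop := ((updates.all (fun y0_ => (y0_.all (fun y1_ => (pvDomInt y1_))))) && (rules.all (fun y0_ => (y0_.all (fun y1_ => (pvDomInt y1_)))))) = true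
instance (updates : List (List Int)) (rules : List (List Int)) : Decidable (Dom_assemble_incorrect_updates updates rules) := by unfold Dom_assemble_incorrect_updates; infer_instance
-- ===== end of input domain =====

-- B replaces A's per-page rescans (for each page, for each rule, scan the update's tail) by one pass
-- per update building first/last-occurrence dicts, then a single lookup-based check per rule.

-- ===== PORT A =====
-- inner 'for rule in rules' loop of get_inc_update; rule[0]/rule[1] ported as getD (exact under Pre_: every rule has ≥ 2 elements)
def pvRuleLoop (update_i : List Int) (i : Nat) (page : Int) : List (List Int) → Bool
  | [] => false
  | r :: rs =>
    if page = r.getD 1 0 then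
      if (update_i.drop i).contains (r.getD 0 0) then true
      else pvRuleLoop update_i i page rs
    else pvRuleLoop update_i i page rs

-- outer 'for i, page in enumerate(update_i)' loop; some update_i = 'return update_i', none = 'return False'
def pvPageLoop (rules : List (List Int)) (update_i : List Int) (i : Nat) : List Int → Option (List Int)
  | [] => none
  | p :: rest =>
    if pvRuleLoop update_i i p rules then some update_i
    else pvPageLoop rules update_i (i + 1) rest

def assemble_incorrect_updates (updates : List (List Int)) (rules : List (List Int)) : List (List Int) :=
  updates.foldl (fun acc update =>
    match pvPageLoop rules update 0 update with
    | some new_inc => if new_inc.isEmpty then acc else acc ++ [new_inc]  -- walrus truthiness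
    | none => acc) []

-- ===== PORT B =====
def pvPairs (rules : List (List Int)) : List (Int × Int) :=
  rules.map (fun r => (r.getD 0 0, r.getD 1 0))

-- one pass over the update: first- and last-occurrence index of each page
def pvFirstLast (u : List Int) : PySem.Dict Int Int × PySem.Dict Int Int :=
  (PySem.List.enumerate u 0).foldl
    (fun fl ip =>
      (if fl.1.contains ip.2 then fl.1 else fl.1.insert ip.2 ip.1,
       fl.2.insert ip.2 ip.1))
    (PySem.Dict.empty, PySem.Dict.empty)

def pvIncorrect (pairs : List (Int × Int)) (u : List Int) : Bool :=
  let fl := pvFirstLast u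
  pairs.any (fun ab =>
    match fl.1.get? ab.2, fl.2.get? ab.1 with
    | some fb, some la => decide (fb ≤ la)
    | _, _ => false)

def assemble_incorrect_updates_alt (updates : List (List Int)) (rules : List (List Int)) : List (List Int) :=
  let pairs := pvPairs rules
  updates.foldl (fun out u => if pvIncorrect pairs u then out ++ [u] else out) []

-- ===== PRECONDITION & SPEC =====
-- Pre_ excludes rule lists containing a rule with fewer than 2 pages: A's rule[1] (or rule[0]) raises
-- IndexError on such a rule whenever the loop reaches it (only degenerate inputs avoid reaching it).
def Pre_assemble_incorrect_updates (updates : List (List Int)) (rules : List (List Int)) : Prop :=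
  rules.all (fun r => 2 ≤ r.length) = true
instance (updates : List (List Int)) (rules : List (List Int)) : Decidable (Pre_assemble_incorrect_updates updates rules) := by unfold Pre_assemble_incorrect_updates; infer_instance
def pvWitness_assemble_incorrect_updates : List (List Int) × List (List Int) :=
  ([[2, 1], [1, 2]], [[1, 2]])

def Spec_assemble_incorrect_updates (updates : List (List Int)) (rules : List (List Int)) (out : List (List Int)) : Prop := out = assemble_incorrect_updates_alt updates rules
instance (updates : List (List Int)) (rules : List (List Int)) (out : List (List Int)) : Decidable (Spec_assemble_incorrect_updates updates rules out) := by unfold Spec_assemble_incorrect_updates; infer_instance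

-- ===== CLAIM (what is proved, stated in full; the proofs are below) =====
def Claim_equal_assemble_incorrect_updates : Prop := ∀ (updates : List (List Int)) (rules : List (List Int)), Dom_assemble_incorrect_updates updates rules → Pre_assemble_incorrect_updates updates rules → Spec_assemble_incorrect_updates updates rules (assemble_incorrect_updates updates rules)

-- ===== LEMMAS AND PROOFS =====

-- spec-side first/last occurrence indices
def pvFirstIdx? : List Int → Int → Option Nat
  | [], _ => none
  | a :: l, x => if a = x then some 0 else (pvFirstIdx? l x).map (· + 1)

def pvLastIdx? : List Int → Int → Option Nat
  | [], _ => none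
  | a :: l, x =>
    match pvLastIdx? l x with
    | some n => some (n + 1)
    | none => if a = x then some 0 else none

theorem pvFirstIdx?_spec {u : List Int} {x : Int} {n : Nat} (h : pvFirstIdx? u x = some n) :
    ∃ hn : n < u.length, u[n] = x := by
  induction u generalizing n with
  | nil => simp [pvFirstIdx?] at h
  | cons a l ih =>
    simp only [pvFirstIdx?] at h
    split at h
    · rename_i hax
      injection h with h; subst h
      exact ⟨by simp, by simpa using hax⟩
    · simp only [Option.map_eq_some_iff] at h
      obtain ⟨m, hm, rfl⟩ := h
      obtain ⟨h1, h2⟩ := ih hm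
      exact ⟨by simpa using Nat.succ_lt_succ h1, by simpa using h2⟩

theorem pvFirstIdx?_le {u : List Int} {x : Int} {j : Nat} (hj : j < u.length) (hx : u[j] = x) :
    ∃ n, pvFirstIdx? u x = some n ∧ n ≤ j := by
  induction u generalizing j with
  | nil => simp at hj
  | cons a l ih =>
    simp only [pvFirstIdx?]
    by_cases hax : a = x
    · exact ⟨0, by simp [hax], Nat.zero_le _⟩
    · cases j with
      | zero => simp_all
      | succ j' =>
        obtain ⟨n, hn, hle⟩ := ih (by simpa using hj) (by simpa using hx)
        exact ⟨n + 1, by simp [hax, hn], by omega⟩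

theorem pvLastIdx?_spec {u : List Int} {x : Int} {n : Nat} (h : pvLastIdx? u x = some n) :
    ∃ hn : n < u.length, u[n] = x := by
  induction u generalizing n with
  | nil => simp [pvLastIdx?] at h
  | cons a l ih =>
    simp only [pvLastIdx?] at h
    cases hrec : pvLastIdx? l x with
    | some m =>
      rw [hrec] at h
      obtain ⟨h1, h2⟩ := ih hrec
      cases h
      exact ⟨by simpa using Nat.succ_lt_succ h1, by simpa using h2⟩
    | none =>
      rw [hrec] at h
      change (if a = x then some 0 else none) = some n at h
      by_cases hax : a = x
      · rw [if_pos hax] at h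
        injection h with h; subst h
        exact ⟨by simp, by simpa using hax⟩
      · rw [if_neg hax] at h
        exact absurd h (by simp)

theorem pvLastIdx?_ge {u : List Int} {x : Int} {j : Nat} (hj : j < u.length) (hx : u[j] = x) :
    ∃ n, pvLastIdx? u x = some n ∧ j ≤ n := by
  induction u generalizing j with
  | nil => simp at hj
  | cons a l ih =>
    simp only [pvLastIdx?]
    cases j with
    | zero =>
      cases hrec : pvLastIdx? l x with
      | some m => exact ⟨m + 1, rfl, by omega⟩
      | none => simp_all
    | succ j' =>
      obtain ⟨n, hn, hge⟩ := ih (by simpa using hj) (by simpa using hx)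
      rw [hn]
      exact ⟨n + 1, rfl, by omega⟩

-- the dicts built by pvFirstLast compute exactly pvFirstIdx?/pvLastIdx?
theorem pvFirstLast_go (l : List Int) (s : Nat) (f0 l0 : PySem.Dict Int Int) :
    ∀ x : Int,
      ((PySem.List.enumerate l (s : Int)).foldl
        (fun fl ip =>
          (if fl.1.contains ip.2 then fl.1 else fl.1.insert ip.2 ip.1,
           fl.2.insert ip.2 ip.1)) (f0, l0)).1.get? x =
        (match f0.get? x with
         | some v => some v
         | none => (pvFirstIdx? l x).map (fun n => ((s + n : Nat) : Int))) ∧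
      ((PySem.List.enumerate l (s : Int)).foldl
        (fun fl ip =>
          (if fl.1.contains ip.2 then fl.1 else fl.1.insert ip.2 ip.1,
           fl.2.insert ip.2 ip.1)) (f0, l0)).2.get? x =
        (match pvLastIdx? l x with
         | some n => some ((s + n : Nat) : Int)
         | none => l0.get? x) := by
  induction l generalizing s f0 l0 with
  | nil =>
    intro x
    constructor
    · cases hf : f0.get? x <;> simp [PySem.List.enumerate, pvFirstIdx?, hf]
    · simp [PySem.List.enumerate, pvLastIdx?]
  | cons a l ih =>
    intro x
    rw [PySem.List.enumerate_cons]
    simp only [List.foldl_cons]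
    have h := ih (s + 1) (if f0.contains a then f0 else f0.insert a (s : Int)) (l0.insert a (s : Int)) x
    simp only [Nat.cast_add, Nat.cast_one] at h
    refine ⟨h.1.trans ?_, h.2.trans ?_⟩
    · -- first dict
      by_cases hax : a = x
      · subst hax
        simp only [pvFirstIdx?]
        by_cases hc : f0.contains a = true
        · rw [if_pos hc]
          have := PySem.Dict.contains_eq_isSome_get? (d := f0) (k := a)
          rw [hc] at this
          obtain ⟨v, hv⟩ := Option.isSome_iff_exists.mp this.symm
          rw [hv]
        · rw [if_neg hc, PySem.Dict.get?_insert_self]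
          have hnone : f0.get? a = none := by
            rw [← Option.not_isSome_iff_eq_none, ← PySem.Dict.contains_eq_isSome_get?]
            exact hc
          rw [hnone]
          simp
      · have hget : (if f0.contains a then f0 else f0.insert a (s : Int)).get? x = f0.get? x := by
          split
          · rfl
          · exact PySem.Dict.get?_insert_of_ne _ _ (fun h : x = a => hax h.symm)
        rw [hget]
        cases hf : f0.get? x with
        | some v => rfl
        | none =>
          simp only [pvFirstIdx?, if_neg hax]
          cases pvFirstIdx? l x with
          | none => rfl
          | some n =>
            simp only [Option.map_some]
            congr 1
            omega
    · -- last dict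
      cases hrec : pvLastIdx? l x with
      | some n =>
        simp only [pvLastIdx?, hrec]
        congr 1
        omega
      | none =>
        simp only [pvLastIdx?, hrec]
        by_cases hax : a = x
        · subst hax
          rw [if_pos rfl, PySem.Dict.get?_insert_self]
          simp
        · rw [if_neg hax]
          exact PySem.Dict.get?_insert_of_ne _ _ (fun h : x = a => hax h.symm)

theorem pvFirstLast_fst (u : List Int) (x : Int) :
    (pvFirstLast u).1.get? x = Option.map (fun n : Nat => (n : Int)) (pvFirstIdx? u x) := by
  have h := (pvFirstLast_go u 0 PySem.Dict.empty PySem.Dict.empty x).1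
  simp only [Nat.cast_zero, Nat.zero_add, PySem.Dict.get?_empty] at h
  unfold pvFirstLast
  exact h

theorem pvFirstLast_snd (u : List Int) (x : Int) :
    (pvFirstLast u).2.get? x = Option.map (fun n : Nat => (n : Int)) (pvLastIdx? u x) := by
  have h := (pvFirstLast_go u 0 PySem.Dict.empty PySem.Dict.empty x).2
  simp only [Nat.cast_zero, Nat.zero_add, PySem.Dict.get?_empty] at h
  unfold pvFirstLast
  rw [h]
  cases pvLastIdx? u x <;> simp

-- A's inner loop as an 'any'
theorem pvRuleLoop_iff (u : List Int) (i : Nat) (p : Int) (rules : List (List Int)) :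
    pvRuleLoop u i p rules = true ↔
      ∃ r ∈ rules, p = r.getD 1 0 ∧ (r.getD 0 0) ∈ u.drop i := by
  induction rules with
  | nil => simp [pvRuleLoop]
  | cons r rs ih =>
    simp only [pvRuleLoop]
    split_ifs with h1 h2
    · simp only [true_iff]
      exact ⟨r, by simp, h1, by simpa using h2⟩
    · rw [ih]
      constructor
      · rintro ⟨r', hr', h⟩; exact ⟨r', by simp [hr'], h⟩
      · rintro ⟨r', hr', h⟩
        rcases List.mem_cons.mp hr' with rfl | hm
        · exact absurd (by simpa using h.2) h2
        · exact ⟨r', hm, h⟩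
    · rw [ih]
      constructor
      · rintro ⟨r', hr', h⟩; exact ⟨r', by simp [hr'], h⟩
      · rintro ⟨r', hr', h⟩
        rcases List.mem_cons.mp hr' with rfl | hm
        · exact absurd h.1 h1
        · exact ⟨r', hm, h⟩

theorem pvPageLoop_eq_some (rules : List (List Int)) (u : List Int) (i : Nat) (rest : List Int) :
    ∀ v, pvPageLoop rules u i rest = some v → v = u := by
  induction rest generalizing i with
  | nil => simp [pvPageLoop]
  | cons p ps ih =>
    intro v h
    simp only [pvPageLoop] at h
    split at h
    · cases h; rfl
    · exact ih _ _ h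

theorem pvPageLoop_isSome_iff (rules : List (List Int)) (u : List Int) (i : Nat) (rest : List Int) :
    (pvPageLoop rules u i rest).isSome = true ↔
      ∃ (j : Nat) (hj : j < rest.length), pvRuleLoop u (i + j) rest[j] rules = true := by
  induction rest generalizing i with
  | nil => simp [pvPageLoop]
  | cons p ps ih =>
    simp only [pvPageLoop]
    split_ifs with h
    · simp only [Option.isSome_some, true_iff]
      exact ⟨0, by simp, by simpa using h⟩
    · rw [ih]
      constructor
      · rintro ⟨j, hj, hr⟩
        refine ⟨j + 1, by simpa using Nat.succ_lt_succ hj, ?_⟩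
        simpa [Nat.add_comm, Nat.add_left_comm, Nat.add_assoc] using hr
      · rintro ⟨j, hj, hr⟩
        cases j with
        | zero => exact absurd (by simpa using hr) h
        | succ j' =>
          refine ⟨j', by simpa using hj, ?_⟩
          simpa [Nat.add_comm, Nat.add_left_comm, Nat.add_assoc] using hr

-- per-update: A's predicate equals B's predicate
theorem pvPred_iff (rules : List (List Int)) (u : List Int) :
    (pvPageLoop rules u 0 u).isSome = true ↔ pvIncorrect (pvPairs rules) u = true := by
  rw [pvPageLoop_isSome_iff]
  simp only [pvIncorrect, pvPairs, List.any_eq_true, List.mem_map]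
  constructor
  · rintro ⟨j, hj, hr⟩
    obtain ⟨r, hr_mem, hp, ha⟩ := (pvRuleLoop_iff u j _ rules).mp (by simpa using hr)
    obtain ⟨k, hk1, hk2⟩ := List.getElem_of_mem ha
    rw [List.getElem_drop] at hk2
    obtain ⟨fb, hfb, hfb_le⟩ := pvFirstIdx?_le hj hp
    have hk1' : j + k < u.length := by rw [List.length_drop] at hk1; omega
    obtain ⟨la, hla, hla_ge⟩ := pvLastIdx?_ge hk1' hk2
    refine ⟨(r.getD 0 0, r.getD 1 0), ⟨r, hr_mem, rfl⟩, ?_⟩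
    rw [pvFirstLast_fst, pvFirstLast_snd, hfb, hla]
    simp only [Option.map_some]
    show decide ((fb : Int) ≤ (la : Int)) = true
    simp only [decide_eq_true_eq]
    exact_mod_cast (by omega : fb ≤ la)
  · rintro ⟨⟨a, b⟩, ⟨r, hr_mem, hab⟩, hcheck⟩
    obtain ⟨rfl, rfl⟩ : a = r.getD 0 0 ∧ b = r.getD 1 0 :=
      ⟨congrArg Prod.fst hab.symm, congrArg Prod.snd hab.symm⟩
    rw [pvFirstLast_fst, pvFirstLast_snd] at hcheck
    cases hfb : pvFirstIdx? u (r.getD 1 0) with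
    | none =>
      rw [hfb] at hcheck
      simp only [Option.map_none] at hcheck
      exact absurd hcheck (by cases Option.map (fun n : Nat => (n : Int)) (pvLastIdx? u (r.getD 0 0)) <;> simp)
    | some fb =>
      cases hla : pvLastIdx? u (r.getD 0 0) with
      | none =>
        rw [hfb, hla] at hcheck
        simp only [Option.map_some, Option.map_none] at hcheck
        exact absurd hcheck (by simp)
      | some la =>
        rw [hfb, hla] at hcheck
        simp only [Option.map_some, decide_eq_true_eq] at hcheck
        have hle : fb ≤ la := by exact_mod_cast hcheck
        obtain ⟨hfb_lt, hfb_eq⟩ := pvFirstIdx?_spec hfb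
        obtain ⟨hla_lt, hla_eq⟩ := pvLastIdx?_spec hla
        refine ⟨fb, hfb_lt, ?_⟩
        simp only [Nat.zero_add]
        rw [pvRuleLoop_iff]
        refine ⟨r, hr_mem, hfb_eq, ?_⟩
        rw [List.mem_iff_getElem]
        refine ⟨la - fb, by rw [List.length_drop]; omega, ?_⟩
        rw [List.getElem_drop]
        simp only [Nat.add_sub_cancel' hle]
        exact hla_eq

theorem pvFoldEq (rules : List (List Int)) (updates : List (List Int)) (acc : List (List Int)) :
    updates.foldl (fun acc update =>
      match pvPageLoop rules update 0 update with
      | some new_inc => if new_inc.isEmpty then acc else acc ++ [new_inc]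
      | none => acc) acc
    = updates.foldl (fun out u => if pvIncorrect (pvPairs rules) u then out ++ [u] else out) acc := by
  induction updates generalizing acc with
  | nil => rfl
  | cons u us ih =>
    simp only [List.foldl_cons]
    rw [ih]
    congr 1
    cases hpl : pvPageLoop rules u 0 u with
    | some v =>
      have hv : v = u := pvPageLoop_eq_some rules u 0 u v hpl
      rw [hv]
      have hs : (pvPageLoop rules u 0 u).isSome = true := by rw [hpl]; rfl
      have hinc := (pvPred_iff rules u).mp hs
      have hne : u.isEmpty = false := by
        obtain ⟨j, hj, -⟩ := (pvPageLoop_isSome_iff rules u 0 u).mp hs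
        cases u
        · simp at hj
        · rfl
      simp [hinc, hne]
    | none =>
      have hinc : pvIncorrect (pvPairs rules) u = false := by
        cases hic : pvIncorrect (pvPairs rules) u
        · rfl
        · exact absurd ((pvPred_iff rules u).mpr hic) (by simp [hpl])
      simp [hinc]

-- ===== VERDICT (by name: the statement is the Claim_ definition above) =====
theorem assemble_incorrect_updates_spec : Claim_equal_assemble_incorrect_updates := by
  intro updates rules _ _
  unfold Spec_assemble_incorrect_updates assemble_incorrect_updates assemble_incorrect_updates_alt
  exact pvFoldEq rules updates []
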